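-- pv_equiv track=rewrite | github.com/epibook/epibook.github.io | solutions/python/collatz.py | collatz_check
-- ===== SOURCE A (Python) =====
-- def collatz_check(x, visited):
--     if x == 1:
--         return True
--     elif x in visited:
--         return False
--     visited.add(x)
--     if x & 1:  # odd number
--         return collatz_check(3 * x + 1, visited)
--     else:  # even number
--         return collatz_check(x >> 1, visited)  # divide by 2
-- ===== SOURCE B (Python) =====
-- def collatz_check(x, visited):
--     # Two-phase decomposition: first RUN the trajectory with a combined loop
--     # condition to find the terminating value, then DECIDE by comparing it to 1.
--     # The caller's 'visited' set is only read (A mutates it; return value is the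
--     # same).
--     seen = set(visited)
--     cur = x
--     while cur != 1 and cur not in seen:
--         seen.add(cur)
--         cur = 3 * cur + 1 if cur & 1 else cur >> 1
--     return cur == 1
-- ===== Notes on version B (the rewrite author's own statement) =====
-- stated objective: alternative
-- what changed: The three-way branching recursion is replaced by a two-phase iteration: a while loop with a combined 'cur != 1 and cur not in seen' condition runs the trajectory to its terminating value over a local copy of the set, and the answer is then the single comparison cur == 1; the caller's visited set is not mutated.
import Mathlib
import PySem

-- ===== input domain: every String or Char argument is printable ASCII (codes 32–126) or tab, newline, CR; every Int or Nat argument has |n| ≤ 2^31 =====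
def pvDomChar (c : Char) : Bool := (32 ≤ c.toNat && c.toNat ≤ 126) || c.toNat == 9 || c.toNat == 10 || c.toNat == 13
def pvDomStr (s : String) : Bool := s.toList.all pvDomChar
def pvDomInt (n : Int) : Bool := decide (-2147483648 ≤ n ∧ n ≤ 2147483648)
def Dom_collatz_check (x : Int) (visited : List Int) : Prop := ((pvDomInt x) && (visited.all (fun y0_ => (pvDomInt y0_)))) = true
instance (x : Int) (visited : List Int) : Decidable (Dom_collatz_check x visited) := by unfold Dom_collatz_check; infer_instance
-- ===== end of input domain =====

-- ===== PORT A =====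
-- B is a two-phase iteration over a local copy of the set returning the same value; A's
-- Python mutates the caller's visited set, B's does not — the equivalence proved is about
-- the return value. Both ports carry a fuel guard (1000000) making the recursion structural;
-- each consumes one unit per trajectory step, so they exhaust fuel at the same point and
-- equality below is unconditional.
def collatzA (fuel : Nat) (x : Int) (visited : PySem.Set Int) : Bool :=
  match fuel with
  | 0 => false
  | fuel + 1 =>
    if x = 1 then true
    else if visited.contains x then false
    else
      let visited' := visited.add x
      if PySem.Int.band x 1 != 0 then collatzA fuel (3 * x + 1) visited'
      else collatzA fuel (x >>> 1) visited'

def collatz_check (x : Int) (visited : List Int) : Bool :=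
  collatzA 1000000 x visited

-- ===== PORT B =====
-- phase 1: run the while loop to the terminating value of 'cur' (none = fuel exhausted)
def collatzRun (fuel : Nat) (cur : Int) (seen : PySem.Set Int) : Option Int :=
  match fuel with
  | 0 => none
  | fuel + 1 =>
    if cur = 1 ∨ seen.contains cur = true then some cur
    else collatzRun fuel (if PySem.Int.band cur 1 != 0 then 3 * cur + 1 else cur >>> 1)
                    (seen.add cur)

-- phase 2: decide by comparing the terminating value with 1
def collatz_check_alt (x : Int) (visited : List Int) : Bool :=
  match collatzRun 1000000 x (PySem.Set.ofList visited) with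
  | some c => c == 1
  | none => false

-- ===== PRECONDITION & SPEC =====
def Spec_collatz_check (x : Int) (visited : List Int) (out : Bool) : Prop := out = collatz_check_alt x visited
instance (x : Int) (visited : List Int) (out : Bool) : Decidable (Spec_collatz_check x visited out) := by unfold Spec_collatz_check; infer_instance

-- ===== CLAIM (what is proved, stated in full; the proofs are below) =====
def Claim_equal_collatz_check : Prop := ∀ (x : Int) (visited : List Int), Dom_collatz_check x visited → Spec_collatz_check x visited (collatz_check x visited)

-- ===== LEMMAS AND PROOFS =====

lemma set_contains_add (s : PySem.Set Int) (x y : Int) :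
    (s.add x).contains y = (s.contains y || y == x) := by
  simp [PySem.Set.add, PySem.Set.contains]
  by_cases h : y = x <;> by_cases h2 : x ∈ s <;> simp_all

-- A's fueled recursion equals B's run-then-compare, as long as the two sets agree
-- as membership tests.
lemma collatz_run_eq (fuel : Nat) :
    ∀ (x : Int) (S T : PySem.Set Int),
    (∀ y, S.contains y = T.contains y) →
    collatzA fuel x S = (match collatzRun fuel x T with
                         | some c => c == 1
                         | none => false) := by
  induction fuel with
  | zero => intro x S T _; rfl
  | succ fuel ih =>
    intro x S T hinv
    rw [collatzA, collatzRun]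
    by_cases hx : x = 1
    · simp [hx]
    · rw [if_neg hx]
      by_cases hm : T.contains x = true
      · rw [hinv x, if_pos hm, if_pos (Or.inr hm)]
        simp [hx]
      · have hcond : ¬ (x = 1 ∨ T.contains x = true) := by simp [hx, PySem.Set.contains] at hm ⊢; exact hm
        rw [hinv x, if_neg hm, if_neg hcond]
        have hinv' : ∀ y, (S.add x).contains y = (T.add x).contains y := by
          intro y; rw [set_contains_add, set_contains_add, hinv y]
        by_cases hodd : (PySem.Int.band x 1 != 0) = true
        · simp only [if_pos hodd]; exact ih _ _ _ hinv'
        · simp only [if_neg hodd]; exact ih _ _ _ hinv'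

-- ===== VERDICT (by name: the statement is the Claim_ definition above) =====
theorem collatz_check_spec : Claim_equal_collatz_check := by
  intro x visited _
  unfold Spec_collatz_check collatz_check collatz_check_alt
  apply collatz_run_eq
  intro y
  simp [PySem.Set.contains, PySem.Set.mem_ofList]
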